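-- pv_equiv track=rewrite | github.com/k4west/Algorithm | 프로그래머스/2/42626. 더 맵게/더 맵게.py | solution
-- ===== SOURCE A (Python) =====
-- from heapq import heappop, heappush, heapify
--
-- def solution(scoville, K):
--     answer = 0
--     heapify(scoville)
--     while (a:=heappop(scoville)) < K:
--         if scoville:
--             heappush(scoville, a + heappop(scoville)*2)
--             answer += 1
--         else:
--             return -1
--     return answer
-- ===== SOURCE B (Python) =====
-- def solution(scoville, K):
--     # Plain list with repeated linear min-scans instead of a heap.
--     # Return-value equivalent to A; in-place mutation of `scoville` differs.
--     answer = 0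
--     while True:
--         mi = 0
--         for i in range(1, len(scoville)):
--             if scoville[i] < scoville[mi]:
--                 mi = i
--         a = scoville.pop(mi)      # IndexError on empty, like heappop
--         if a >= K:
--             return answer
--         if not scoville:
--             return -1
--         mj = 0
--         for i in range(1, len(scoville)):
--             if scoville[i] < scoville[mj]:
--                 mj = i
--         b = scoville.pop(mj)
--         scoville.append(a + b * 2)
--         answer += 1
-- ===== Notes on version B (the rewrite author's own statement) =====
-- stated objective: alternative
-- what changed: Replaces the binary heap (heapify/heappop/heappush) with a plain list processed by explicit linear minimum-scans and index pops, a different data structure and traversal.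
import Mathlib
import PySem

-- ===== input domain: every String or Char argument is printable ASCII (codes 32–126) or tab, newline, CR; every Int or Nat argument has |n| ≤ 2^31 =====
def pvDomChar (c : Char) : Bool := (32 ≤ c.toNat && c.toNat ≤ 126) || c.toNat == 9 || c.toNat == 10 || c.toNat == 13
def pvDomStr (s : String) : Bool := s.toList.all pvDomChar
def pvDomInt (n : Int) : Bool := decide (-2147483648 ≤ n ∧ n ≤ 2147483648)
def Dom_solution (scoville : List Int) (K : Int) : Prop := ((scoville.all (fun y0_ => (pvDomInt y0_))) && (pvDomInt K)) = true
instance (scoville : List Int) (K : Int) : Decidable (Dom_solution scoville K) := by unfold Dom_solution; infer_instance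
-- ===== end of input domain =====

-- B replaces the heap with a plain list processed by explicit linear minimum-scans
-- and index pops (alternative data structure, not faster). Equivalence is about the
-- RETURN value only: both Pythons mutate `scoville` in place (differently).

-- ===== PORT A =====
-- The heapq library calls are ported by their priority-queue specification:
-- the heap is kept as a sorted list, heapify = sort, heappop = take the minimum
-- at the head, heappush = ordered insert.  This is exact for the returned value,
-- since only the sequence of popped minima is observable in `solution`.

def insortHeap (x : Int) : List Int → List Int
  | [] => [x]
  | y :: ys => if x ≤ y then x :: y :: ys else y :: insortHeap x ys

theorem insortHeap_length (x : Int) (l : List Int) :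
    (insortHeap x l).length = l.length + 1 := by
  induction l with
  | nil => rfl
  | cons y ys ih => simp only [insortHeap]; split <;> simp [ih]

def solLoop (K : Int) : List Int → Int → Int
  | [], _ => 0            -- heappop on the empty heap: IndexError, excluded by Pre_
  | a :: rest, answer =>
      if a < K then
        match rest with
        | [] => -1
        | b :: rest' => solLoop K (insortHeap (a + b * 2) rest') (answer + 1)
      else answer
termination_by l _ => l.length
decreasing_by simp [insortHeap_length]

def solution (scoville : List Int) (K : Int) : Int :=
  solLoop K (scoville.mergeSort (fun a b => decide (a ≤ b))) 0

-- ===== PORT B =====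
-- mi = 0; for i in range(1, len(l)): if l[i] < l[mi]: mi = i
def scanMinIdx (l : List Int) : Nat :=
  (List.range' 1 (l.length - 1)).foldl
    (fun mi i => if l.getD i 0 < l.getD mi 0 then i else mi) 0

theorem scanMin_foldl_lt (l : List Int) (is : List Nat) (acc : Nat)
    (h : acc < l.length) (his : ∀ i ∈ is, i < l.length) :
    is.foldl (fun mi i => if l.getD i 0 < l.getD mi 0 then i else mi) acc < l.length := by
  induction is generalizing acc with
  | nil => exact h
  | cons i is ih =>
      simp only [List.foldl_cons]
      apply ih
      · split
        · exact his i (by simp)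
        · exact h
      · intro j hj; exact his j (by simp [hj])

theorem scanMinIdx_lt (l : List Int) (h : l ≠ []) : scanMinIdx l < l.length := by
  have hlen : 0 < l.length := List.length_pos_iff.mpr h
  exact scanMin_foldl_lt l _ 0 hlen (by
    intro i hi
    have := List.mem_range'_1.mp hi
    omega)

def altLoop (K : Int) : List Int → Int → Int
  | [], _ => 0            -- pop from the empty list: IndexError, excluded by Pre_
  | x :: xs, answer =>
      let l := x :: xs
      let mi := scanMinIdx l
      let a := l.getD mi 0
      let l1 := l.eraseIdx mi
      if K ≤ a then answer
      else if hl1 : l1 = [] then -1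
      else
        let mj := scanMinIdx l1
        let b := l1.getD mj 0
        altLoop K (l1.eraseIdx mj ++ [a + b * 2]) (answer + 1)
termination_by l _ => l.length
decreasing_by
  have h1 : scanMinIdx (x :: xs) < (x :: xs).length := scanMinIdx_lt _ (by simp)
  have h2 : scanMinIdx ((x :: xs).eraseIdx (scanMinIdx (x :: xs))) <
      ((x :: xs).eraseIdx (scanMinIdx (x :: xs))).length := scanMinIdx_lt _ hl1
  have h0 : ((x :: xs).eraseIdx (scanMinIdx (x :: xs))).length ≠ 0 :=
    fun hc => hl1 (List.length_eq_zero_iff.mp hc)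
  simp only [List.length_append, List.length_eraseIdx, List.length_cons,
    List.length_nil] at h0 h1 h2 ⊢
  split_ifs at h0 h2 ⊢ <;> omega

def solution_alt (scoville : List Int) (K : Int) : Int :=
  altLoop K scoville 0

-- ===== PRECONDITION & SPEC =====
-- A raises IndexError (heappop from an empty heap) on the empty list; excluded.
def Pre_solution (scoville : List Int) (K : Int) : Prop := scoville ≠ []
instance (scoville : List Int) (K : Int) : Decidable (Pre_solution scoville K) := by
  unfold Pre_solution; infer_instance

def pvWitness_solution : List Int × Int := ([1, 2, 3, 9, 10, 12], 7)

def Spec_solution (scoville : List Int) (K : Int) (out : Int) : Prop :=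
  out = solution_alt scoville K
instance (scoville : List Int) (K : Int) (out : Int) : Decidable (Spec_solution scoville K out) := by
  unfold Spec_solution; infer_instance

-- ===== CLAIM (what is proved, stated in full; the proofs are below) =====
def Claim_equal_solution : Prop := ∀ (scoville : List Int) (K : Int),
  Dom_solution scoville K → Pre_solution scoville K →
  Spec_solution scoville K (solution scoville K)

-- ===== LEMMAS AND PROOFS =====

theorem insortHeap_perm (x : Int) (l : List Int) : (insortHeap x l).Perm (x :: l) := by
  induction l with
  | nil => exact List.Perm.refl _
  | cons y ys ih =>
      simp only [insortHeap]
      split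
      · exact List.Perm.refl _
      · exact (ih.cons y).trans (List.Perm.swap x y ys)

theorem insortHeap_sorted (x : Int) (l : List Int) (h : l.Pairwise (· ≤ ·)) :
    (insortHeap x l).Pairwise (· ≤ ·) := by
  induction l with
  | nil => simp [insortHeap]
  | cons y ys ih =>
      rw [List.pairwise_cons] at h
      simp only [insortHeap]
      split
      · rename_i hxy
        rw [List.pairwise_cons]
        refine ⟨?_, List.pairwise_cons.mpr h⟩
        intro b hb
        rcases List.mem_cons.mp hb with rfl | hb
        · exact hxy
        · exact le_trans hxy (h.1 b hb)
      · rename_i hxy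
        rw [List.pairwise_cons]
        refine ⟨?_, ih h.2⟩
        intro b hb
        have := (insortHeap_perm x ys).mem_iff.mp hb
        rcases List.mem_cons.mp this with rfl | hb'
        · omega
        · exact h.1 b hb'

-- the fold result's value is ≤ the value at the accumulator and at every scanned index
theorem scanMin_foldl_le (l : List Int) (is : List Nat) (acc : Nat) :
    l.getD (is.foldl (fun mi i => if l.getD i 0 < l.getD mi 0 then i else mi) acc) 0 ≤ l.getD acc 0 ∧
    ∀ i ∈ is, l.getD (is.foldl (fun mi i => if l.getD i 0 < l.getD mi 0 then i else mi) acc) 0 ≤ l.getD i 0 := by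
  induction is generalizing acc with
  | nil => exact ⟨le_refl _, by simp⟩
  | cons i is ih =>
      simp only [List.foldl_cons]
      by_cases hc : l.getD i 0 < l.getD acc 0
      · rw [if_pos hc]
        refine ⟨le_trans (ih i).1 (le_of_lt hc), ?_⟩
        intro j hj
        rcases List.mem_cons.mp hj with rfl | hj
        · exact (ih j).1
        · exact (ih i).2 j hj
      · rw [if_neg hc]
        refine ⟨(ih acc).1, ?_⟩
        intro j hj
        rcases List.mem_cons.mp hj with rfl | hj
        · exact le_trans (ih acc).1 (le_of_not_gt hc)
        · exact (ih acc).2 j hj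

theorem scanMinIdx_min (l : List Int) (h : l ≠ []) :
    ∀ y ∈ l, l.getD (scanMinIdx l) 0 ≤ y := by
  intro y hy
  obtain ⟨j, hj, rfl⟩ := List.mem_iff_getElem.mp hy
  have hgd : l[j] = l.getD j 0 := by
    rw [List.getD_eq_getElem l 0 hj]
  rw [hgd]
  rcases Nat.eq_zero_or_pos j with rfl | hjpos
  · exact (scanMin_foldl_le l _ 0).1
  · refine (scanMin_foldl_le l _ 0).2 j ?_
    exact List.mem_range'_1.mpr (by omega)

theorem getD_mem (l : List Int) (i : Nat) (h : i < l.length) : l.getD i 0 ∈ l := by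
  rw [List.getD_eq_getElem l 0 h]
  exact List.getElem_mem h

theorem perm_cons_eraseIdx (l : List Int) (i : Nat) (h : i < l.length) :
    l.Perm (l.getD i 0 :: l.eraseIdx i) := by
  induction l generalizing i with
  | nil => simp at h
  | cons x xs ih =>
      cases i with
      | zero => simp
      | succ i =>
          simp only [List.length_cons, Nat.succ_lt_succ_iff] at h
          simp only [List.getD_cons_succ, List.eraseIdx_cons_succ]
          exact ((ih i h).cons x).trans (List.Perm.swap _ x _)

-- the head of a sorted list equals the minimal value of any permutation of it
theorem sorted_head_eq_min (a : Int) (t l₂ : List Int) (hs : (a :: t).Pairwise (· ≤ ·))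
    (hp : (a :: t).Perm l₂) (m : Int) (hm : m ∈ l₂) (hmin : ∀ y ∈ l₂, m ≤ y) : m = a := by
  have ham : a ∈ l₂ := hp.mem_iff.mp (by simp)
  have h1 : m ≤ a := hmin a ham
  have h2 : a ≤ m := by
    rcases List.mem_cons.mp (hp.mem_iff.mpr hm) with rfl | hmt
    · exact le_refl _
    · exact (List.pairwise_cons.mp hs).1 m hmt
  omega

theorem loop_eq (K : Int) : ∀ (n : Nat) (l₁ l₂ : List Int), l₁.length = n →
    l₁.Pairwise (· ≤ ·) → l₁.Perm l₂ → ∀ ans, solLoop K l₁ ans = altLoop K l₂ ans := by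
  intro n
  induction n with
  | zero =>
      intro l₁ l₂ hlen _ hp ans
      have h1 : l₁ = [] := List.length_eq_zero_iff.mp hlen
      subst h1
      have h2 : l₂ = [] := hp.nil_eq.symm
      subst h2
      rw [solLoop.eq_def, altLoop.eq_def]
  | succ n ih =>
      intro l₁ l₂ hlen hs hp ans
      obtain ⟨a, t, rfl⟩ : ∃ a t, l₁ = a :: t := by
        cases l₁ with
        | nil => simp at hlen
        | cons a t => exact ⟨a, t, rfl⟩
      obtain ⟨x, xs, rfl⟩ : ∃ x xs, l₂ = x :: xs := by
        cases hx : l₂ with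
        | nil => subst hx; exact absurd hp.symm.nil_eq (by simp)
        | cons x xs => exact ⟨x, xs, rfl⟩
      have hl₂ne : (x :: xs) ≠ [] := by simp
      have hmi : scanMinIdx (x :: xs) < (x :: xs).length := scanMinIdx_lt _ hl₂ne
      have ha2 : (x :: xs).getD (scanMinIdx (x :: xs)) 0 = a :=
        sorted_head_eq_min a t _ hs hp _ (getD_mem _ _ hmi) (scanMinIdx_min _ hl₂ne)
      rw [solLoop.eq_def, altLoop.eq_def]
      simp only [ha2]
      by_cases hK : a < K
      · rw [if_pos hK, if_neg (by omega)]
        have hperm1 : (x :: xs).Perm (a :: (x :: xs).eraseIdx (scanMinIdx (x :: xs))) := by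
          have := perm_cons_eraseIdx (x :: xs) (scanMinIdx (x :: xs)) hmi
          rwa [ha2] at this
        have htper : t.Perm ((x :: xs).eraseIdx (scanMinIdx (x :: xs))) :=
          (hp.trans hperm1).cons_inv
        cases t with
        | nil =>
            have : (x :: xs).eraseIdx (scanMinIdx (x :: xs)) = [] := htper.nil_eq.symm
            rw [dif_pos this]
        | cons b t' =>
            set l1 := (x :: xs).eraseIdx (scanMinIdx (x :: xs)) with hl1def
            have hl1ne : l1 ≠ [] := by
              intro hc
              have := htper.length_eq
              simp [hc] at this
            rw [dif_neg hl1ne]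
            simp only [← hl1def]
            have hts : (b :: t').Pairwise (· ≤ · : Int → Int → Prop) :=
              (List.pairwise_cons.mp hs).2
            have hmj : scanMinIdx l1 < l1.length := scanMinIdx_lt l1 hl1ne
            have hb2 : l1.getD (scanMinIdx l1) 0 = b :=
              sorted_head_eq_min b t' l1 hts htper _ (getD_mem l1 _ hmj) (scanMinIdx_min l1 hl1ne)
            simp only [hb2]
            have hperm2 : l1.Perm (b :: l1.eraseIdx (scanMinIdx l1)) := by
              have := perm_cons_eraseIdx l1 (scanMinIdx l1) hmj
              rwa [hb2] at this
            have ht'per : t'.Perm (l1.eraseIdx (scanMinIdx l1)) :=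
              (htper.trans hperm2).cons_inv
            refine ih (insortHeap (a + b * 2) t') (l1.eraseIdx (scanMinIdx l1) ++ [a + b * 2])
              ?_ (insortHeap_sorted _ _ (List.pairwise_cons.mp hts).2) ?_ (ans + 1)
            · rw [insortHeap_length]
              simp only [List.length_cons] at hlen
              omega
            · refine (insortHeap_perm _ _).trans ?_
              refine ((ht'per.cons (a + b * 2)).trans ?_)
              exact (List.perm_append_singleton _ _).symm
      · rw [if_neg hK, if_pos (by omega)]

-- ===== VERDICT (by name: the statement is the Claim_ definition above) =====
theorem solution_spec : Claim_equal_solution := by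
  intro scoville K _ _
  unfold Spec_solution solution solution_alt
  have hs : (scoville.mergeSort (fun a b => decide (a ≤ b))).Pairwise (· ≤ ·) := by
    have := List.pairwise_mergeSort (le := fun a b : Int => decide (a ≤ b))
      (by intro a b c h1 h2; simp at *; omega)
      (by intro a b; simp [Int.le_total]) scoville
    simpa using this
  exact loop_eq K _ _ scoville rfl hs (List.mergeSort_perm scoville _) 0
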